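-- pv_equiv track=rewrite | github.com/rapidsai/cugraph | python/cugraph/generators/rmat.py | calc_num_edges_per_worker
-- ===== SOURCE A (Python) =====
-- def calc_num_edges_per_worker(num_workers, num_edges):
--     """
--     FIXME: add docstring
--     """
--     #48 and 10
--     L= []
--     w = num_edges//num_workers
--     r = num_edges%num_workers
--     for i in range (num_workers):
--         if (i<r):
--             L.append(w+1)
--         else:
--             L.append(w)
--     return L
-- ===== SOURCE B (Python) =====
-- def calc_num_edges_per_worker(num_workers, num_edges):
--     counts = []
--     remaining = num_edges
--     workers = num_workers
--     for _ in range(num_workers):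
--         c = -(-remaining // workers)  # ceiling division: this worker's share
--         counts.append(c)
--         remaining -= c
--         workers -= 1
--     return counts
-- ===== Notes on version B (the rewrite author's own statement) =====
-- stated objective: alternative
-- what changed: Replaces the precomputed quotient/remainder plus branch-on-index loop with a greedy running-quotient loop that takes the ceiling of remaining/workers each step and updates both counters.
import Mathlib
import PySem

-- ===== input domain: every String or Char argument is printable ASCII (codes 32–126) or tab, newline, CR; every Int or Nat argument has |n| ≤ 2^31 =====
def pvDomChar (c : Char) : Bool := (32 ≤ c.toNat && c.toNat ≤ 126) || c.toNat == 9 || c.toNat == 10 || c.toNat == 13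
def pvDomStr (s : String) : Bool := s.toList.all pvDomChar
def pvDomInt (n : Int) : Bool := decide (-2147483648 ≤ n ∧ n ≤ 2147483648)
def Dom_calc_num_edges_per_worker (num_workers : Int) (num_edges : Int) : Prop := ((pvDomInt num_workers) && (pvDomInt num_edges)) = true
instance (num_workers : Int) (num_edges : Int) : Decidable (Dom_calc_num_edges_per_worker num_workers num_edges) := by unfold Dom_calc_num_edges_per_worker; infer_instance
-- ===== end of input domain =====

-- B replaces A's precomputed quotient/remainder-with-branch loop by a greedy
-- running-ceiling loop over two mutating counters (alternative decomposition, same O(n) cost).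

-- ===== PORT A =====
def calc_num_edges_per_worker (num_workers : Int) (num_edges : Int) : List Int :=
  let w := PySem.Int.floordiv num_edges num_workers
  let r := PySem.Int.mod num_edges num_workers
  (PySem.List.pyRange 0 num_workers 1).foldl
    (fun L i => if i < r then L ++ [w + 1] else L ++ [w]) []

-- ===== PORT B =====
-- Source B's 'for _ in range(num_workers)' loop as structural recursion on the trip
-- count (range(n) is empty for n ≤ 0, hence .toNat); the state is (remaining, workers)
def pvAltLoop : Nat → Int → Int → List Int
  | 0, _, _ => []
  | n + 1, remaining, workers =>
    let c := -(PySem.Int.floordiv (-remaining) workers)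
    c :: pvAltLoop n (remaining - c) (workers - 1)

def calc_num_edges_per_worker_alt (num_workers : Int) (num_edges : Int) : List Int :=
  pvAltLoop num_workers.toNat num_edges num_workers

-- ===== PRECONDITION & SPEC =====
-- Pre_ excludes only num_workers = 0, where Python A raises ZeroDivisionError.
def Pre_calc_num_edges_per_worker (num_workers : Int) (num_edges : Int) : Prop := num_workers ≠ 0
instance (num_workers : Int) (num_edges : Int) : Decidable (Pre_calc_num_edges_per_worker num_workers num_edges) := by unfold Pre_calc_num_edges_per_worker; infer_instance
def pvWitness_calc_num_edges_per_worker : Int × Int := (4, 10)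

def Spec_calc_num_edges_per_worker (num_workers : Int) (num_edges : Int) (out : List Int) : Prop := out = calc_num_edges_per_worker_alt num_workers num_edges
instance (num_workers : Int) (num_edges : Int) (out : List Int) : Decidable (Spec_calc_num_edges_per_worker num_workers num_edges out) := by unfold Spec_calc_num_edges_per_worker; infer_instance

-- ===== CLAIM (what is proved, stated in full; the proofs are below) =====
def Claim_equal_calc_num_edges_per_worker : Prop := ∀ (num_workers : Int) (num_edges : Int), Dom_calc_num_edges_per_worker num_workers num_edges → Pre_calc_num_edges_per_worker num_workers num_edges → Spec_calc_num_edges_per_worker num_workers num_edges (calc_num_edges_per_worker num_workers num_edges)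

-- ===== LEMMAS AND PROOFS =====

-- ceiling division -((-E) // m) in terms of a given quotient/remainder decomposition
lemma pvCeil_eq (E q r m : Int) (hm : 0 < m) (hE : E = q * m + r) (h0 : 0 ≤ r) (hr : r < m) :
    -(PySem.Int.floordiv (-E) m) = if r = 0 then q else q + 1 := by
  split_ifs with h
  · apply (PySem.Int.neg_floordiv_neg_eq_iff_of_pos hm).mpr
    have h1 : (q - 1) * m = q * m - m := by ring
    constructor
    · rw [h1]; omega
    · omega
  · apply (PySem.Int.neg_floordiv_neg_eq_iff_of_pos hm).mpr
    have h1 : (q + 1 - 1) * m = q * m := by ring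
    have h2 : (q + 1) * m = q * m + m := by ring
    constructor
    · rw [h1]; omega
    · rw [h2]; omega

-- exact division: the greedy loop gives q to every worker
lemma pvAltLoop_exact : ∀ (n : Nat) (q : Int), pvAltLoop n (q * n) n = List.replicate n q := by
  intro n
  induction n with
  | zero => intro q; simp [pvAltLoop]
  | succ n ih =>
    intro q
    have hcast : ((n + 1 : Nat) : Int) = (n : Int) + 1 := by push_cast; ring
    have hc : -(PySem.Int.floordiv (-(q * (((n + 1 : Nat)) : Int))) (((n + 1 : Nat)) : Int)) = q := by
      rw [hcast]
      have := pvCeil_eq (q * ((n : Int) + 1)) q 0 ((n : Int) + 1) (by positivity) (by ring) le_rfl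
        (by positivity)
      simpa using this
    simp only [pvAltLoop, hc, List.replicate_succ]
    rw [show q * (((n + 1 : Nat)) : Int) - q = q * n from by push_cast; ring,
      show (((n + 1 : Nat)) : Int) - 1 = (n : Int) from by push_cast; ring, ih q]

-- the greedy loop front-loads the r extra edges on the first r workers
lemma pvAltLoop_closed : ∀ (n : Nat) (E q r : Int), E = q * n + r → 0 ≤ r → r < n →
    pvAltLoop n E n = List.replicate r.toNat (q + 1) ++ List.replicate (n - r.toNat) q := by
  intro n
  induction n with
  | zero => intro E q r _ h0 hr; omega
  | succ n ih =>
    intro E q r hE h0 hr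
    have hcast : ((n + 1 : Nat) : Int) = (n : Int) + 1 := by push_cast; ring
    by_cases hr0 : r = 0
    · subst hr0
      have hE' : E = q * ((n : Nat) + 1 : Int) := by rw [hE, hcast]; ring
      rw [show E = q * (((n + 1 : Nat)) : Int) from by rw [hE', hcast],
        pvAltLoop_exact (n + 1) q]
      simp
    · have hc : -(PySem.Int.floordiv (-E) (((n + 1 : Nat)) : Int)) = q + 1 := by
        rw [hcast]
        have := pvCeil_eq E q r ((n : Int) + 1) (by positivity) (by rw [hE]; push_cast; ring) h0
          (by push_cast at hr ⊢; omega)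
        simpa [hr0] using this
      simp only [pvAltLoop, hc]
      have hrec : E - (q + 1) = q * n + (r - 1) := by rw [hE]; push_cast; ring
      have hlt : r - 1 < (n : Int) := by push_cast at hr; omega
      rw [show (((n + 1 : Nat)) : Int) - 1 = (n : Int) from by push_cast; ring,
        ih (E - (q + 1)) q (r - 1) hrec (by omega) hlt]
      have hrn : r.toNat = (r - 1).toNat + 1 := by omega
      rw [hrn, List.replicate_succ]
      have : n + 1 - ((r - 1).toNat + 1) = n - (r - 1).toNat := by omega
      rw [this]
      simp

-- the branch-on-index map over range(n) equals the replicate form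
lemma pvMap_closed : ∀ (n : Nat) (r w : Int), 0 ≤ r →
    (List.range n).map (fun (k : Nat) => if (k : Int) < r then w + 1 else w) =
      List.replicate (min r.toNat n) (w + 1) ++ List.replicate (n - r.toNat) w := by
  intro n
  induction n with
  | zero => intro r w _; simp
  | succ n ih =>
    intro r w h0
    rw [List.range_succ, List.map_append, ih r w h0]
    by_cases hn : (n : Int) < r
    · have h1 : min r.toNat n = n := by omega
      have h2 : n - r.toNat = 0 := by omega
      have h3 : min r.toNat (n + 1) = n + 1 := by omega
      have h4 : n + 1 - r.toNat = 0 := by omega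
      simp [hn, h1, h2, h4, List.replicate_succ']
    · have h1 : min r.toNat n = r.toNat := by omega
      have h3 : min r.toNat (n + 1) = r.toNat := by omega
      have h4 : n + 1 - r.toNat = (n - r.toNat) + 1 := by omega
      simp only [List.map_cons, List.map_nil, if_neg hn, h1, h3, h4]
      rw [List.replicate_succ']
      simp

-- A's append-only foldl is a map over the range
lemma pvA_map (n r w : Int) :
    (PySem.List.pyRange 0 n 1).foldl (fun L i => if i < r then L ++ [w + 1] else L ++ [w]) [] =
      (PySem.List.pyRange 0 n 1).map (fun i => if i < r then w + 1 else w) := by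
  have h : (fun (L : List Int) (i : Int) => if i < r then L ++ [w + 1] else L ++ [w]) =
      fun L i => L ++ [if i < r then w + 1 else w] := by
    funext L i; split_ifs <;> rfl
  rw [h, PySem.List.foldl_append_singleton_eq_map]
  simp

-- ===== VERDICT (by name: the statement is the Claim_ definition above) =====
theorem calc_num_edges_per_worker_spec : Claim_equal_calc_num_edges_per_worker := by
  intro nw ne _ hpre
  unfold Spec_calc_num_edges_per_worker calc_num_edges_per_worker calc_num_edges_per_worker_alt
  rcases lt_or_gt_of_ne hpre with hneg | hpos
  · have h1 : nw.toNat = 0 := by omega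
    have h2 : (nw - 0).toNat = 0 := by omega
    rw [PySem.List.pyRange_one, h1, h2]
    simp [pvAltLoop]
  · set w := PySem.Int.floordiv ne nw with hw
    set r := PySem.Int.mod ne nw with hrdef
    have hE : ne = w * nw + r := (PySem.Int.floordiv_mul_add_mod ne nw).symm
    have h0 : 0 ≤ r := PySem.Int.mod_nonneg ne hpos
    have hr : r < nw := PySem.Int.mod_lt ne hpos
    have hn : nw = (nw.toNat : Int) := by omega
    rw [pvA_map, PySem.List.pyRange_one,
      show (nw - 0).toNat = nw.toNat from by omega, List.map_map]
    have hmap : ((fun i => if i < r then w + 1 else w) ∘ fun (k : Nat) => (0 : Int) + k) =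
        fun (k : Nat) => if (k : Int) < r then w + 1 else w := by
      funext k; simp
    rw [hmap, pvMap_closed nw.toNat r w h0]
    conv_rhs => rw [hn]
    simp only [Int.toNat_natCast]
    rw [pvAltLoop_closed nw.toNat ne w r (by rw [← hn]; exact hE) h0 (by omega)]
    rw [show min r.toNat nw.toNat = r.toNat from by omega]
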